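-- pv_equiv track=rewrite | github.com/nine-thoughts/Calculator | Full_Project/calculus.py | exponent_mark_exponent
-- ===== SOURCE A (Python) =====
-- def exponent_mark_exponent(term):
--     # This is the second function in the family and returns the exponent portion of a term without its base
--     # This is the same function as above, but with a different return variable
--
--     base = ""
--     exponent = ""
--     term = term.replace("**", "^")
--     found_x = False
--     for char in term:
--         if char != "^" and not found_x:
--             if char != "x":
--                 base += char
--             else:
--                 found_x = True
--                 if base == "" or base == "-":  # If no base is found or base is just a negative sign, set base to 1 or -1
--                     base += "1"
--         elif found_x:
--             if char == "^":
--                 continue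
--             else:
--                 exponent += char
--     if exponent == "" and found_x:  # If no exponent is found, set exponent to 1
--         exponent = "1"
--     elif exponent == "" and not found_x:
--         exponent = "0"
--     if base == "" and not found_x:  # If term is just a constant, set base to term
--         base = term
--     exponent = exponent.replace("(", "")
--     exponent = exponent.replace(")", "")
--     return exponent
-- ===== SOURCE B (Python) =====
-- def exponent_mark_exponent(term):
--     term = term.replace("**", "^")
--     i = term.find("x")
--     if i == -1:
--         return "0"
--     exp = "".join(c for c in term[i + 1:] if c != "^")
--     if exp == "":
--         return "1"
--     return "".join(c for c in exp if c not in "()")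
-- ===== Notes on version B (the rewrite author's own statement) =====
-- stated objective: simpler
-- what changed: Replaced the per-character state machine with (base, exponent, found_x) accumulators by locating the first 'x' and operating on the suffix after it with whole-string filters, dropping the unused base bookkeeping.
import Mathlib
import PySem

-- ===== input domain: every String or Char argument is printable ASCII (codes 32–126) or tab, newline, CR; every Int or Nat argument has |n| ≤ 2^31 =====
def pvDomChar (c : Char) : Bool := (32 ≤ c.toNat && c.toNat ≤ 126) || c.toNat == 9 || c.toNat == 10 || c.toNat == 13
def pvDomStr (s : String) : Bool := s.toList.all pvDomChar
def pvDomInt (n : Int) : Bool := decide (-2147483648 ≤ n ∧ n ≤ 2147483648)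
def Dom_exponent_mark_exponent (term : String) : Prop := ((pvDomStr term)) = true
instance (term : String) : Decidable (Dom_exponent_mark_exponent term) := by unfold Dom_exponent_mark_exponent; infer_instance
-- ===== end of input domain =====

-- B replaces A's character-by-character state machine by a split at the first 'x' plus
-- filtering of the suffix (objective: simpler decomposition; return value only, no mutation).

-- ===== PORT A =====
-- one step of A's for-loop over the characters, state = (base, exponent, found_x)
def pvAStep (st : List Char × List Char × Bool) (c : Char) : List Char × List Char × Bool :=
  match st with
  | (base, exponent, found) =>
    if c ≠ '^' ∧ found = false then
      if c ≠ 'x' then (base ++ [c], exponent, found)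
      else (if base = [] ∨ base = ['-'] then base ++ ['1'] else base, exponent, true)
    else if found then
      if c = '^' then (base, exponent, found)
      else (base, exponent ++ [c], found)
    else (base, exponent, found)

def exponent_mark_exponent (term : String) : String :=
  let t := PySem.Str.replace term "**" "^"
  let st := t.toList.foldl pvAStep ([], [], false)
  let exponent := st.2.1
  let found := st.2.2
  let exponent := if exponent = [] ∧ found then ['1']
                  else if exponent = [] ∧ found = false then ['0'] else exponent
  -- A's final re-assignment of `base` is omitted: `base` is not returned
  let exponent := PySem.Chars.replace exponent ['('] []
  let exponent := PySem.Chars.replace exponent [')'] []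
  String.ofList exponent

-- ===== PORT B =====
def exponent_mark_exponent_alt (term : String) : String :=
  let t := PySem.Str.replace term "**" "^"
  let i := PySem.Str.find t "x"
  if i = -1 then "0"
  else
    let after := PySem.List.slice t.toList (some (i + 1)) none    -- term[i+1:]
    let exp := after.filter (fun c => c ≠ '^')                    -- join of the comprehension
    if exp = [] then "1"
    else String.ofList (exp.filter (fun c => ¬ (c = '(' ∨ c = ')')))  -- c not in "()"

-- ===== PRECONDITION & SPEC =====
def Spec_exponent_mark_exponent (term : String) (out : String) : Prop := out = exponent_mark_exponent_alt term
instance (term : String) (out : String) : Decidable (Spec_exponent_mark_exponent term out) := by unfold Spec_exponent_mark_exponent; infer_instance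

-- ===== CLAIM (what is proved, stated in full; the proofs are below) =====
def Claim_equal_exponent_mark_exponent : Prop := ∀ (term : String), Dom_exponent_mark_exponent term → Spec_exponent_mark_exponent term (exponent_mark_exponent term)

-- ===== LEMMAS AND PROOFS =====

-- replacing a single character by "" is filtering it out
theorem pv_replace_go_single (c : Char) (cs : List Char) : ∀ (fuel : Nat) (acc : List Char),
    cs.length ≤ fuel →
    PySem.Chars.replace.go [c] [] fuel cs acc = acc.reverse ++ cs.filter (fun a => a ≠ c) := by
  induction cs with
  | nil =>
      intro fuel acc _
      cases fuel <;> simp [PySem.Chars.replace.go]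
  | cons d t ih =>
      intro fuel acc hle
      cases fuel with
      | zero => simp at hle
      | succ f =>
        by_cases hd : d = c
        · subst hd
          simp [PySem.Chars.replace.go, List.isPrefixOf, ih f acc (by simpa using hle)]
        · have hpre : [c].isPrefixOf (d :: t) = false := by
            simp [List.isPrefixOf]
            exact fun h => hd h.symm
          simp [PySem.Chars.replace.go, hpre, hd, ih f (d :: acc) (by simpa using hle)]

theorem pv_replace_single (c : Char) (cs : List Char) :
    PySem.Chars.replace cs [c] [] = cs.filter (fun a => a ≠ c) := by
  simpa using pv_replace_go_single c cs cs.length [] le_rfl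

-- once found_x is true the loop only accumulates non-'^' characters into exponent
theorem pv_fold_true (cs : List Char) : ∀ (base exp : List Char),
    cs.foldl pvAStep (base, exp, true) = (base, exp ++ cs.filter (fun a => a ≠ '^'), true) := by
  induction cs with
  | nil => intro base exp; simp
  | cons d t ih =>
      intro base exp
      by_cases hd : d = '^'
      · subst hd; simp [pvAStep, ih]
      · simp [pvAStep, hd, ih]

-- before found_x: exponent/found of the final state, in terms of the suffix after the first 'x'
theorem pv_fold_false (cs : List Char) : ∀ (base exp : List Char),
    (cs.foldl pvAStep (base, exp, false)).2 =
      if 'x' ∈ cs then (exp ++ ((cs.dropWhile (fun a => a ≠ 'x')).tail.filter (fun a => a ≠ '^')), true)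
      else (exp, false) := by
  induction cs with
  | nil => intro base exp; simp
  | cons d t ih =>
      intro base exp
      by_cases hx : d = 'x'
      · subst hx
        simp [pvAStep, pv_fold_true]
      · by_cases hc : d = '^'
        · subst hc
          simp [pvAStep, ih, hx]
        · simp [pvAStep, hx, Ne.symm hx, hc, ih]

-- the dropWhile view of "first index of 'x'"
theorem pv_dropWhile_drop (cs : List Char) : ∀ (n : Nat),
    ['x'] <+: cs.drop n → (∀ i < n, ¬ ['x'] <+: cs.drop i) →
    cs.dropWhile (fun a => a ≠ 'x') = cs.drop n := by
  induction cs with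
  | nil =>
      intro n hx _
      simp at hx
  | cons d t ih =>
      intro n hx hmin
      cases n with
      | zero =>
          have hd : d = 'x' := by
            rcases hx with ⟨s, hs⟩
            simp at hs
            exact hs.1.symm
          simp [List.dropWhile, hd]
      | succ m =>
          have hd : d ≠ 'x' := by
            intro h
            exact hmin 0 (Nat.succ_pos m) ⟨t, by simp [h]⟩
          have := ih m (by simpa using hx) (fun i hi => by
            have := hmin (i + 1) (by omega)
            simpa using this)
          simpa [List.dropWhile, hd] using this

-- the two paren-filters of A compose into B's single filter
theorem pv_paren_filters (l : List Char) :
    (l.filter (fun a => a ≠ '(')).filter (fun a => a ≠ ')') =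
      l.filter (fun c => ¬ (c = '(' ∨ c = ')')) := by
  rw [List.filter_filter]
  apply List.filter_congr
  intro c _
  by_cases h1 : c = '(' <;> by_cases h2 : c = ')' <;> simp [h1, h2]

-- ===== VERDICT (by name: the statement is the Claim_ definition above) =====
theorem exponent_mark_exponent_spec : Claim_equal_exponent_mark_exponent := by
  intro term _
  unfold Spec_exponent_mark_exponent exponent_mark_exponent exponent_mark_exponent_alt
  simp only []
  set t := PySem.Str.replace term "**" "^" with ht
  set cs := t.toList with hcs
  have hfind : PySem.Str.find t "x" = PySem.Chars.find cs ['x'] := by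
    simp [PySem.Str.find_eq, hcs]
  by_cases hmem : 'x' ∈ cs
  · -- find succeeds
    have hinf : ['x'] <:+: cs := (List.singleton_infix_iff 'x' cs).mpr hmem
    have hne : PySem.Chars.find cs ['x'] ≠ -1 := by
      rw [Ne, PySem.Chars.find_eq_neg_one_iff]
      simpa using hinf
    have hge : 0 ≤ PySem.Chars.find cs ['x'] := by
      have := PySem.Chars.neg_one_le_find cs ['x']
      omega
    obtain ⟨hpre, hmin⟩ := PySem.Chars.find_spec hge
    have hdw : cs.dropWhile (fun a => a ≠ 'x') = cs.drop (PySem.Chars.find cs ['x']).toNat :=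
      pv_dropWhile_drop cs _ hpre hmin
    have hslice : PySem.List.slice cs (some (PySem.Chars.find cs ['x'] + 1)) none =
        (cs.dropWhile (fun a => a ≠ 'x')).tail := by
      rw [PySem.List.slice_from cs (by omega), hdw]
      have : (PySem.Chars.find cs ['x'] + 1).toNat = (PySem.Chars.find cs ['x']).toNat + 1 := by
        omega
      rw [this, ← List.tail_drop]
    rw [hfind, if_neg hne, hslice]
    rw [pv_fold_false cs [] [], if_pos hmem]
    simp only [List.nil_append]
    set e := (cs.dropWhile (fun a => a ≠ 'x')).tail.filter (fun a => a ≠ '^') with he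
    by_cases hemp : e = []
    · simp [hemp, pv_replace_single]
    · rw [if_neg (by simp [hemp]), if_neg (by simp [hemp]), if_neg hemp]
      rw [pv_replace_single, pv_replace_single, pv_paren_filters]
  · -- no 'x': A never sets found_x, B returns "0"
    have hinf : ¬ ['x'] <:+: cs := by
      rw [List.singleton_infix_iff]; exact hmem
    have hne : PySem.Chars.find cs ['x'] = -1 :=
      (PySem.Chars.find_eq_neg_one_iff cs ['x']).mpr hinf
    rw [hfind, if_pos hne]
    rw [pv_fold_false cs [] [], if_neg hmem]
    simp [pv_replace_single]
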